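-- pv_equiv track=rewrite | github.com/Larsluph/AoC | 2021/day8/part2.py | get_25
-- ===== SOURCE A (Python) =====
-- def get_25(patterns):
--     patterns_5 = list()
--     patterns_6 = list()
--     for pattern in patterns:
--         (patterns_5 if len(pattern) == 5 else patterns_6).append(pattern)
--
--     for letter in patterns_5[0]:
--         for pattern in patterns_6:
--             if letter not in pattern:
--                 return patterns_5
--     return patterns_5[::-1]
-- ===== SOURCE B (Python) =====
-- def get_25(patterns):
--     rev5 = []            # the length-5 patterns, newest first (already reversed)
--     inter = None         # running intersection of char-sets of the other patterns
--     for p in patterns: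
--         if len(p) == 5:
--             rev5.insert(0, p)
--         else:
--             s = set(p)
--             inter = s if inter is None else inter & s
--     first = rev5[-1]     # == patterns_5[0]; IndexError if no length-5 pattern
--     if inter is None or all(c in inter for c in first):
--         return rev5
--     return rev5[::-1]
-- ===== Notes on version B (the rewrite author's own statement) =====
-- stated objective: alternative
-- what changed: One single pass that builds the length-5 list back-to-front (prepend) and maintains a running intersection of the other patterns' character sets, so the final decision is one membership scan of the first length-5 pattern against that intersection instead of A's letter-outer/pattern-inner nested membership loops over the whole length-6 list.
import Mathlib
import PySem

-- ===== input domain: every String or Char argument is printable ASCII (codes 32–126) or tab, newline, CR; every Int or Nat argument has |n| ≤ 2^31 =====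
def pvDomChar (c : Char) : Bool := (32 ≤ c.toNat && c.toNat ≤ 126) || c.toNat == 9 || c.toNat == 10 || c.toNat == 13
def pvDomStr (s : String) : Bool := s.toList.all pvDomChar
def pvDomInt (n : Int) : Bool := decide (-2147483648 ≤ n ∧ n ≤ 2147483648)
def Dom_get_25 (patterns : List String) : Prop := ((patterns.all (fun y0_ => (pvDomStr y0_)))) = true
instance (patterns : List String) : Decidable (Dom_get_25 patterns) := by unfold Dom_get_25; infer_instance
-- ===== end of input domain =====

-- B is a single pass that builds the length-5 list back-to-front and maintains a running
-- intersection of the other patterns' character sets; return-value equivalence only.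

-- ===== PORT A =====
-- inner 'for pattern in patterns_6: if letter not in pattern: return patterns_5' (true = early return)
def pvAInner (letter : Char) : List String → Bool
  | [] => false
  | p :: rest => if letter ∈ p.toList then pvAInner letter rest else true

-- outer 'for letter in patterns_5[0]: …' then 'return patterns_5[::-1]'
def pvAOuter (p5 p6 : List String) : List Char → List String
  | [] => p5.reverse
  | l :: rest => if pvAInner l p6 then p5 else pvAOuter p5 p6 rest

def get_25 (patterns : List String) : List String :=
  let st := patterns.foldl
    (fun (st : List String × List String) p =>
      if p.toList.length = 5 then (st.1 ++ [p], st.2) else (st.1, st.2 ++ [p]))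
    ([], [])
  match PySem.List.pyGet? st.1 0 with
  | none => []          -- patterns_5[0] raises IndexError: excluded by Pre_get_25
  | some first => pvAOuter st.1 st.2 first.toList

-- ===== PORT B =====
def get_25_alt (patterns : List String) : List String :=
  let st := patterns.foldl
    (fun (st : List String × Option (PySem.Set Char)) p =>
      if p.toList.length = 5 then (p :: st.1, st.2)
      else
        let s := PySem.Set.ofList p.toList
        (st.1, some (match st.2 with | none => s | some i => PySem.Set.inter i s)))
    ([], none)
  match PySem.List.pyGet? st.1 (-1) with
  | none => []          -- rev5[-1] raises IndexError: excluded by Pre_get_25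
  | some first =>
    if (match st.2 with
        | none => true
        | some inter => first.toList.all (fun c => PySem.Set.contains inter c)) then
      st.1
    else st.1.reverse

-- ===== PRECONDITION & SPEC =====
-- A raises IndexError (patterns_5[0]) when no pattern has length 5; excluded.
def Pre_get_25 (patterns : List String) : Prop :=
  (patterns.any (fun p => p.toList.length == 5)) = true
instance (patterns : List String) : Decidable (Pre_get_25 patterns) := by unfold Pre_get_25; infer_instance
def pvWitness_get_25 : List String := ["abcde", "abcdef"]

def Spec_get_25 (patterns : List String) (out : List String) : Prop := out = get_25_alt patterns
instance (patterns : List String) (out : List String) : Decidable (Spec_get_25 patterns out) := by unfold Spec_get_25; infer_instance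

-- ===== CLAIM (what is proved, stated in full; the proofs are below) =====
def Claim_equal_get_25 : Prop := ∀ (patterns : List String), Dom_get_25 patterns → Pre_get_25 patterns → Spec_get_25 patterns (get_25 patterns)

-- ===== LEMMAS AND PROOFS =====

-- the running-intersection combining step of B, as a standalone fold
def pvInterStep (o : Option (PySem.Set Char)) (p : String) : Option (PySem.Set Char) :=
  some (match o with | none => PySem.Set.ofList p.toList | some i => PySem.Set.inter i (PySem.Set.ofList p.toList))

theorem pvSplit_eq (patterns : List String) (a b : List String) :
    patterns.foldl
      (fun (st : List String × List String) p =>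
        if p.toList.length = 5 then (st.1 ++ [p], st.2) else (st.1, st.2 ++ [p]))
      (a, b)
    = (a ++ patterns.filter (fun p => p.toList.length = 5),
       b ++ patterns.filter (fun p => ¬ p.toList.length = 5)) := by
  induction patterns generalizing a b with
  | nil => simp
  | cons p rest ih =>
    by_cases h : p.toList.length = 5
    · simp only [List.foldl_cons, if_pos h, ih, List.filter_cons]
      simp [h]
    · simp only [List.foldl_cons, if_neg h, ih, List.filter_cons]
      simp
      simpa using h

theorem pvBFold_eq (patterns : List String) (a : List String) (o : Option (PySem.Set Char)) :
    patterns.foldl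
      (fun (st : List String × Option (PySem.Set Char)) p =>
        if p.toList.length = 5 then (p :: st.1, st.2)
        else
          let s := PySem.Set.ofList p.toList
          (st.1, some (match st.2 with | none => s | some i => PySem.Set.inter i s)))
      (a, o)
    = ((patterns.filter (fun p => p.toList.length = 5)).reverse ++ a,
       (patterns.filter (fun p => ¬ p.toList.length = 5)).foldl pvInterStep o) := by
  induction patterns generalizing a o with
  | nil => simp
  | cons p rest ih =>
    by_cases h : p.toList.length = 5
    · simp only [List.foldl_cons, if_pos h, ih, List.filter_cons]
      simp [h]
    · simp only [List.foldl_cons, if_neg h, ih, List.filter_cons]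
      simp only [h, decide_false]
      simp [pvInterStep]

theorem pvAInner_eq (letter : Char) (p6 : List String) :
    pvAInner letter p6 = !(p6.all (fun p => letter ∈ p.toList)) := by
  induction p6 with
  | nil => rfl
  | cons p rest ih =>
    by_cases h : letter ∈ p.toList <;> simp [pvAInner, h, ih]

theorem pvAOuter_eq (p5 p6 : List String) (letters : List Char) :
    pvAOuter p5 p6 letters =
      if letters.all (fun l => p6.all (fun p => l ∈ p.toList)) then p5.reverse else p5 := by
  induction letters with
  | nil => rfl
  | cons l rest ih =>
    by_cases h : (p6.all (fun p => l ∈ p.toList)) = true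
    · simp [pvAOuter, pvAInner_eq, h, ih]
    · simp [pvAOuter, pvAInner_eq, h]

theorem pvInterFold_some (l : List String) (i : PySem.Set Char) :
    l.foldl pvInterStep (some i)
      = some (l.foldl (fun j p => PySem.Set.inter j (PySem.Set.ofList p.toList)) i) := by
  induction l generalizing i with
  | nil => rfl
  | cons p rest ih => simp [pvInterStep, ih]

theorem pvMem_interFold (l : List String) (i : PySem.Set Char) (c : Char) :
    (c ∈ l.foldl (fun j p => PySem.Set.inter j (PySem.Set.ofList p.toList)) i)
      ↔ (c ∈ i ∧ ∀ p ∈ l, c ∈ p.toList) := by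
  induction l generalizing i with
  | nil => simp
  | cons p rest ih =>
    simp [ih, PySem.Set.mem_inter, PySem.Set.mem_ofList, and_assoc]

-- B's intersection test equals A's letter-outer / pattern-inner condition
theorem pvCond_eq (first : List Char) (p6 : List String) :
    (match p6.foldl pvInterStep none with
      | none => true
      | some inter => first.all (fun c => PySem.Set.contains inter c))
    = first.all (fun l => p6.all (fun p => l ∈ p.toList)) := by
  cases p6 with
  | nil => simp
  | cons p rest =>
    show (match (p :: rest).foldl pvInterStep none with
      | none => true
      | some inter => first.all (fun c => PySem.Set.contains inter c)) = _
    rw [List.foldl_cons]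
    show (match rest.foldl pvInterStep (some (PySem.Set.ofList p.toList)) with
      | none => true
      | some inter => first.all (fun c => PySem.Set.contains inter c)) = _
    rw [pvInterFold_some]
    rw [Bool.eq_iff_iff]
    simp only [List.all_eq_true, PySem.Set.contains_iff, pvMem_interFold,
      PySem.Set.mem_ofList, List.mem_cons, decide_eq_true_eq]
    constructor
    · intro h c hc q hq
      rcases hq with rfl | hq
      · exact (h c hc).1
      · exact (h c hc).2 q hq
    · intro h c hc
      exact ⟨h c hc p (Or.inl rfl), fun q hq => h c hc q (Or.inr hq)⟩

theorem pvLast_reverse (xs : List String) :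
    PySem.List.pyGet? (xs.reverse ++ []) (-1) = PySem.List.pyGet? xs 0 := by
  cases xs with
  | nil => rfl
  | cons x rest =>
    simp [PySem.List.pyGet?, PySem.List.pyIdx?]

theorem get_25_eq_alt (patterns : List String) : get_25 patterns = get_25_alt patterns := by
  unfold get_25 get_25_alt
  rw [pvSplit_eq, pvBFold_eq]
  simp only [List.nil_append]
  rw [pvLast_reverse]
  cases h : PySem.List.pyGet? (patterns.filter (fun p => p.toList.length = 5)) 0 with
  | none => rfl
  | some first =>
    dsimp only
    rw [pvAOuter_eq, pvCond_eq]
    split <;> simp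

-- ===== VERDICT (by name: the statement is the Claim_ definition above) =====
theorem get_25_spec : Claim_equal_get_25 := by
  intro patterns _ _
  exact get_25_eq_alt patterns
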